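-- pv_equiv track=rewrite | github.com/hrharish111/Ebcdictoascii | Sample.py | detect_and_decode
-- ===== SOURCE A (Python) =====
-- def is_ascii(byte):
--     """Check if a byte is a printable ASCII character."""
--     return 32 <= byte <= 126
--
-- def is_packed_bcd(byte):
--     """Check if a byte is part of packed BCD (each nibble 0-9 or last nibble F)."""
--     high_nibble = (byte >> 4) & 0x0F
--     low_nibble = byte & 0x0F
--     return (0 <= high_nibble <= 9) and (0 <= low_nibble <= 9 or low_nibble == 0x0F)
--
-- def is_zoned_decimal(byte):
--     """Check if a byte is zoned decimal (high nibble A-F, low nibble 0-9)."""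
--     high_nibble = (byte >> 4) & 0x0F
--     low_nibble = byte & 0x0F
--     return (0xA <= high_nibble <= 0xF) and (0 <= low_nibble <= 9)
--
-- def unpack_bcd(data):
--     """Convert packed BCD bytes to digits."""
--     return "".join(f"{(byte >> 4) & 0x0F}{byte & 0x0F}" for byte in data).rstrip("F")
--
-- def convert_zoned_decimal(data):
--     """Convert zoned decimal bytes to ASCII string."""
--     result = []
--     for byte in data:
--         num = byte & 0x0F
--         zone = byte >> 4
--         if 0xC <= zone <= 0xF:  # Positive sign
--             result.append(str(num))
--         elif 0xA <= zone <= 0xB:  # Negative sign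
--             result.append(f"-{num}")
--         else:
--             result.append("?")  # Unknown format
--     return "".join(result)
--
-- def detect_and_decode(binary_data):
--     ascii_str = []
--     packed_bcd = []
--     zoned_dec = []
--     buffer = []  # Temporary buffer for packed BCD/zoned decimal
--
--     i = 0
--     while i < len(binary_data):
--         byte = binary_data[i]
--
--         if is_ascii(byte):  # ASCII
--             if buffer:  # If buffer has packed/zoned data, process it first
--                 if is_packed_bcd(buffer[0]):
--                     packed_bcd.append(unpack_bcd(buffer))
--                 elif is_zoned_decimal(buffer[0]):
--                     zoned_dec.append(convert_zoned_decimal(buffer))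
--                 buffer = []
--             ascii_str.append(chr(byte))
--
--         elif is_packed_bcd(byte):  # Potential Packed BCD
--             buffer.append(byte)
--
--         elif is_zoned_decimal(byte):  # Potential Zoned Decimal
--             buffer.append(byte)
--
--         else:  # Unknown format, flush buffer
--             if buffer:
--                 if is_packed_bcd(buffer[0]):
--                     packed_bcd.append(unpack_bcd(buffer))
--                 elif is_zoned_decimal(buffer[0]):
--                     zoned_dec.append(convert_zoned_decimal(buffer))
--                 buffer = []
--
--         i += 1
--
--     # Process leftover buffer
--     if buffer:
--         if is_packed_bcd(buffer[0]):
--             packed_bcd.append(unpack_bcd(buffer))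
--         elif is_zoned_decimal(buffer[0]):
--             zoned_dec.append(convert_zoned_decimal(buffer))
--
--     return "".join(ascii_str), packed_bcd, zoned_dec
-- ===== SOURCE B (Python) =====
-- def is_ascii(byte):
--     return 32 <= byte <= 126
--
-- def is_packed_bcd(byte):
--     high_nibble = (byte >> 4) & 0x0F
--     low_nibble = byte & 0x0F
--     return (0 <= high_nibble <= 9) and (0 <= low_nibble <= 9 or low_nibble == 0x0F)
--
-- def is_zoned_decimal(byte):
--     high_nibble = (byte >> 4) & 0x0F
--     low_nibble = byte & 0x0F
--     return (0xA <= high_nibble <= 0xF) and (0 <= low_nibble <= 9)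
--
-- def unpack_bcd(data):
--     return "".join(f"{(byte >> 4) & 0x0F}{byte & 0x0F}" for byte in data).rstrip("F")
--
-- def convert_zoned_decimal(data):
--     result = []
--     for byte in data:
--         num = byte & 0x0F
--         zone = byte >> 4
--         if 0xC <= zone <= 0xF:
--             result.append(str(num))
--         elif 0xA <= zone <= 0xB:
--             result.append(f"-{num}")
--         else:
--             result.append("?")
--     return "".join(result)
--
-- def _kind(byte):
--     """0 = printable ASCII, 1 = numeric buffer byte (packed BCD or zoned decimal), 2 = unknown."""
--     if is_ascii(byte):
--         return 0
--     if is_packed_bcd(byte) or is_zoned_decimal(byte):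
--         return 1
--     return 2
--
-- def detect_and_decode(binary_data):
--     # Phase 1: group the input into maximal runs of bytes of the same kind.
--     runs = []
--     cur, cur_k = [], None
--     for byte in binary_data:
--         k = _kind(byte)
--         if cur and k == cur_k:
--             cur.append(byte)
--         else:
--             if cur:
--                 runs.append((cur_k, cur))
--             cur, cur_k = [byte], k
--     if cur:
--         runs.append((cur_k, cur))
--     # Phase 2: decode each run independently.
--     ascii_parts, packed_bcd, zoned_dec = [], [], []
--     for k, run in runs:
--         if k == 0:
--             ascii_parts.append("".join(chr(b) for b in run))
--         elif k == 1:
--             if is_packed_bcd(run[0]):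
--                 packed_bcd.append(unpack_bcd(run))
--             else:
--                 zoned_dec.append(convert_zoned_decimal(run))
--     return "".join(ascii_parts), packed_bcd, zoned_dec
-- ===== Notes on version B (the rewrite author's own statement) =====
-- stated objective: simpler
-- what changed: Replaces A's single-pass byte-by-byte state machine with a mutable pending buffer by a two-phase decomposition: first group the input into maximal runs of equal kind (ascii / numeric-buffer / unknown), then decode each run independently.
import Mathlib
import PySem

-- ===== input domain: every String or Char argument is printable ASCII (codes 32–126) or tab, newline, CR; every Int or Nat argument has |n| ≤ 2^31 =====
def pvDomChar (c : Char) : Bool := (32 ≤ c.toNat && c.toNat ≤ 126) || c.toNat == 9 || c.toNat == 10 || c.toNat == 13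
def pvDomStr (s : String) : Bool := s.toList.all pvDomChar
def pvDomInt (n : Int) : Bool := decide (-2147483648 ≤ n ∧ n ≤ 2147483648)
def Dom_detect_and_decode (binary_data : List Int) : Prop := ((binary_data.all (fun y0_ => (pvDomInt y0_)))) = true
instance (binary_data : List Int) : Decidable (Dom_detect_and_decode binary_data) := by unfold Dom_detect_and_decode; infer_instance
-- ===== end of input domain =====

-- B replaces A's single-pass byte/buffer state machine by a two-phase decomposition (group into
-- maximal same-kind runs, then decode each run); objective: simpler. Equal return value proved below.

-- ===== PORT A =====
-- shared module helpers (identical source in Source A and Source B)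
def is_ascii (byte : Int) : Bool := decide (32 ≤ byte) && decide (byte ≤ 126)

def is_packed_bcd (byte : Int) : Bool :=
  let high_nibble := PySem.Int.band ((byte >>> (4 : Nat) : Int)) 15
  let low_nibble := PySem.Int.band byte 15
  (decide (0 ≤ high_nibble) && decide (high_nibble ≤ 9)) &&
    (decide (0 ≤ low_nibble) && decide (low_nibble ≤ 9) || low_nibble == 15)

def is_zoned_decimal (byte : Int) : Bool :=
  let high_nibble := PySem.Int.band ((byte >>> (4 : Nat) : Int)) 15
  let low_nibble := PySem.Int.band byte 15
  (decide (10 ≤ high_nibble) && decide (high_nibble ≤ 15)) &&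
    (decide (0 ≤ low_nibble) && decide (low_nibble ≤ 9))

-- str.rstrip("F"): drop trailing 'F' characters (exact: the stripped set is the single char 'F')
def rstripF (cs : List Char) : List Char := (cs.reverse.dropWhile (· == 'F')).reverse

def unpack_bcd (data : List Int) : String :=
  -- "".join(f"{(byte >> 4) & 0x0F}{byte & 0x0F}" for byte in data).rstrip("F"), built on List Char
  String.ofList (rstripF (PySem.Chars.join [] (data.map (fun (byte : Int) =>
    PySem.Int.toChars (PySem.Int.band ((byte >>> (4 : Nat) : Int)) 15) ++
      PySem.Int.toChars (PySem.Int.band byte 15)))))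

def convert_zoned_decimal (data : List Int) : String :=
  String.ofList (PySem.Chars.join [] ((data.foldl (fun result byte =>
    let num := PySem.Int.band byte 15
    let zone := (byte >>> (4 : Nat) : Int)
    result ++ [if decide (12 ≤ zone) && decide (zone ≤ 15) then PySem.Int.toChars num
               else if decide (10 ≤ zone) && decide (zone ≤ 11) then '-' :: PySem.Int.toChars num
               else ['?']]) [])))

-- chr(byte); exact here: only applied to bytes with 32 ≤ byte ≤ 126
def chrStr (byte : Int) : String := String.singleton (Char.ofNat byte.toNat)

-- A's thrice-repeated "if buffer: … process … " flush block, verbatim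
def flushA (buffer : List Int) (packed_bcd zoned_dec : List String) : List String × List String :=
  match buffer with
  | [] => (packed_bcd, zoned_dec)
  | b0 :: _ =>
      if is_packed_bcd b0 then (packed_bcd ++ [unpack_bcd buffer], zoned_dec)
      else if is_zoned_decimal b0 then (packed_bcd, zoned_dec ++ [convert_zoned_decimal buffer])
      else (packed_bcd, zoned_dec)

-- the while-loop over binary_data with its four mutable accumulators
def loopA : List Int → List String → List String → List String → List Int →
    String × List String × List String
  | [], ascii_str, packed_bcd, zoned_dec, buffer =>
      let (packed_bcd, zoned_dec) := flushA buffer packed_bcd zoned_dec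
      (PySem.Str.join "" ascii_str, packed_bcd, zoned_dec)
  | byte :: rest, ascii_str, packed_bcd, zoned_dec, buffer =>
      if is_ascii byte then
        let (packed_bcd, zoned_dec) := flushA buffer packed_bcd zoned_dec
        loopA rest (ascii_str ++ [chrStr byte]) packed_bcd zoned_dec []
      else if is_packed_bcd byte then
        loopA rest ascii_str packed_bcd zoned_dec (buffer ++ [byte])
      else if is_zoned_decimal byte then
        loopA rest ascii_str packed_bcd zoned_dec (buffer ++ [byte])
      else
        let (packed_bcd, zoned_dec) := flushA buffer packed_bcd zoned_dec
        loopA rest ascii_str packed_bcd zoned_dec []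

def detect_and_decode (binary_data : List Int) : String × List String × List String :=
  loopA binary_data [] [] [] []

-- ===== PORT B =====
def kindB (byte : Int) : Nat :=
  if is_ascii byte then 0
  else if is_packed_bcd byte || is_zoned_decimal byte then 1
  else 2

-- phase 1: maximal runs of equal kind ('cur'/'cur_k' loop of Source B, structurally)
def runsGo (cur_k : Nat) (cur : List Int) : List Int → List (Nat × List Int)
  | [] => [(cur_k, cur)]
  | byte :: rest =>
      if kindB byte == cur_k then runsGo cur_k (cur ++ [byte]) rest
      else (cur_k, cur) :: runsGo (kindB byte) [byte] rest

def runsOf : List Int → List (Nat × List Int)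
  | [] => []
  | byte :: rest => runsGo (kindB byte) [byte] rest

-- phase 2: decode one run (run is never empty by construction; Python's run[0] would raise on [])
def procRun (st : List String × List String × List String) (r : Nat × List Int) :
    List String × List String × List String :=
  let (ascii_parts, packed_bcd, zoned_dec) := st
  let (k, run) := r
  if k == 0 then
    (ascii_parts ++ [PySem.Str.join "" (run.map chrStr)], packed_bcd, zoned_dec)
  else if k == 1 then
    match run with
    | [] => (ascii_parts, packed_bcd, zoned_dec)
    | b0 :: _ =>
        if is_packed_bcd b0 then (ascii_parts, packed_bcd ++ [unpack_bcd run], zoned_dec)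
        else (ascii_parts, packed_bcd, zoned_dec ++ [convert_zoned_decimal run])
  else st

def detect_and_decode_alt (binary_data : List Int) : String × List String × List String :=
  let (ascii_parts, packed_bcd, zoned_dec) := (runsOf binary_data).foldl procRun ([], [], [])
  (PySem.Str.join "" ascii_parts, packed_bcd, zoned_dec)

-- ===== PRECONDITION & SPEC =====
def Spec_detect_and_decode (binary_data : List Int) (out : String × List String × List String) : Prop := out = detect_and_decode_alt binary_data
instance (binary_data : List Int) (out : String × List String × List String) : Decidable (Spec_detect_and_decode binary_data out) := by unfold Spec_detect_and_decode; infer_instance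

-- ===== CLAIM (what is proved, stated in full; the proofs are below) =====
def Claim_equal_detect_and_decode : Prop := ∀ (binary_data : List Int), Dom_detect_and_decode binary_data → Spec_detect_and_decode binary_data (detect_and_decode binary_data)

-- ===== LEMMAS AND PROOFS =====
def flatAsc (asc : List String) : List Char := (asc.map String.toList).flatten

lemma join_empty_eq_flatten (l : List (List Char)) : PySem.Chars.join [] l = l.flatten := by
  induction l with
  | nil => simp [PySem.Chars.join_nil]
  | cons p rest ih =>
      cases rest with
      | nil => simp [PySem.Chars.join_singleton]
      | cons q r => rw [PySem.Chars.join_cons_cons]; simp_all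

lemma toList_join_empty (parts : List String) :
    (PySem.Str.join "" parts).toList = flatAsc parts := by
  rw [PySem.Str.toList_join, flatAsc]
  simp [join_empty_eq_flatten]

lemma join_eq_of_flatAsc_eq {xs ys : List String} (h : flatAsc xs = flatAsc ys) :
    PySem.Str.join "" xs = PySem.Str.join "" ys := by
  apply String.toList_inj.mp
  rw [toList_join_empty, toList_join_empty, h]

lemma toList_joinRun (run : List Int) :
    (PySem.Str.join "" (run.map chrStr)).toList = run.map (fun b => Char.ofNat b.toNat) := by
  rw [toList_join_empty, flatAsc, List.map_map]
  have : (String.toList ∘ chrStr) = fun b : Int => [Char.ofNat b.toNat] := by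
    funext b; simp [chrStr, String.toList_singleton]
  rw [this]
  induction run <;> simp_all

lemma kind_one_elim' {b : Int} (h : kindB b = 1) :
    is_ascii b = false ∧ (is_packed_bcd b = true ∨ is_zoned_decimal b = true) := by
  unfold kindB at h; split_ifs at h with ha hb <;> simp_all

lemma kind_one_not_packed_zoned {b : Int} (h1 : kindB b = 1) (h2 : is_packed_bcd b = false) :
    is_zoned_decimal b = true := by
  rcases (kind_one_elim' h1).2 with h | h
  · rw [h2] at h; cases h
  · exact h

lemma kind_zero_iff {b : Int} : kindB b = 0 ↔ is_ascii b = true := by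
  unfold kindB; split_ifs <;> simp_all

lemma kind_two_elim {b : Int} (h : kindB b = 2) :
    is_ascii b = false ∧ is_packed_bcd b = false ∧ is_zoned_decimal b = false := by
  unfold kindB at h; split_ifs at h with ha hb <;> simp_all

lemma kind_lt_three (b : Int) : kindB b < 3 := by
  unfold kindB; split_ifs <;> omega

-- the k = 1 run/flush agreement
lemma procRun_one_eq_flush (cur : List Int) (asc p z : List String)
    (hne : cur ≠ []) (hk : ∀ b ∈ cur, kindB b = 1) :
    procRun (asc, p, z) (1, cur) = (asc, (flushA cur p z).1, (flushA cur p z).2) := by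
  cases cur with
  | nil => exact absurd rfl hne
  | cons b0 tl =>
      have hb0 := hk b0 (by simp)
      by_cases hp : is_packed_bcd b0 = true
      · simp [procRun, flushA, hp]
      · have hz := kind_one_not_packed_zoned hb0 (by simpa using hp)
        simp [procRun, flushA, hz, hp]

-- step equations for A's loop
lemma loopA_nil (a p z : List String) (buf : List Int) :
    loopA [] a p z buf = (PySem.Str.join "" a, (flushA buf p z).1, (flushA buf p z).2) := by
  rcases hfl : flushA buf p z with ⟨p', z'⟩
  simp [loopA, hfl]

lemma loopA_cons_ascii {byte : Int} (h : is_ascii byte = true) (rest : List Int)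
    (a p z : List String) (buf : List Int) :
    loopA (byte :: rest) a p z buf =
      loopA rest (a ++ [chrStr byte]) (flushA buf p z).1 (flushA buf p z).2 [] := by
  rcases hfl : flushA buf p z with ⟨p', z'⟩
  simp [loopA, h, hfl]

lemma loopA_cons_buf {byte : Int} (h : is_ascii byte = false)
    (h2 : is_packed_bcd byte = true ∨ is_zoned_decimal byte = true) (rest : List Int)
    (a p z : List String) (buf : List Int) :
    loopA (byte :: rest) a p z buf = loopA rest a p z (buf ++ [byte]) := by
  rcases h2 with h2 | h2
  · simp [loopA, h, h2]
  · by_cases hp : is_packed_bcd byte = true <;> simp [loopA, h, h2, hp]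

lemma loopA_cons_unknown {byte : Int} (h : is_ascii byte = false)
    (hp : is_packed_bcd byte = false) (hz : is_zoned_decimal byte = false) (rest : List Int)
    (a p z : List String) (buf : List Int) :
    loopA (byte :: rest) a p z buf =
      loopA rest a (flushA buf p z).1 (flushA buf p z).2 [] := by
  rcases hfl : flushA buf p z with ⟨p', z'⟩
  simp [loopA, h, hp, hz, hfl]

lemma flushA_nil (p z : List String) : flushA [] p z = (p, z) := rfl

lemma flatAsc_append_singleton (xs : List String) (s : String) :
    flatAsc (xs ++ [s]) = flatAsc xs ++ s.toList := by simp [flatAsc]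

lemma procRun_other {k : Nat} (hk0 : k ≠ 0) (hk1 : k ≠ 1)
    (st : List String × List String × List String) (run : List Int) :
    procRun st (k, run) = st := by
  rcases st with ⟨a, p, z⟩
  simp [procRun, hk0, hk1]

lemma procRun_zero (a p z : List String) (run : List Int) :
    procRun (a, p, z) (0, run) =
      (a ++ [PySem.Str.join "" (run.map chrStr)], p, z) := rfl

-- main invariant: processing the pending run (k, cur) plus the remaining runs from B-state
-- (ascB, p, z) computes exactly what A's loop computes from the matching A-state
lemma main_inv (xs : List Int) : ∀ (k : Nat) (cur : List Int) (ascB ascA : List String)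
    (p z : List String), cur ≠ [] → (∀ b ∈ cur, kindB b = k) →
    flatAsc ascA = flatAsc ascB ++ (if k = 0 then cur.map (fun b => Char.ofNat b.toNat) else []) →
    (let (a, pp, zz) := (runsGo k cur xs).foldl procRun (ascB, p, z)
     (PySem.Str.join "" a, pp, zz)) =
      loopA xs ascA p z (if k = 1 then cur else []) := by
  induction xs with
  | nil =>
      intro k cur ascB ascA p z hne hk hflat
      simp only [runsGo, List.foldl_cons, List.foldl_nil]
      by_cases hk0 : k = 0
      · subst hk0
        rw [if_pos rfl] at hflat
        rw [procRun_zero, loopA_nil]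
        refine congrArg (fun s => (s, p, z)) ?_
        apply join_eq_of_flatAsc_eq
        rw [flatAsc_append_singleton, toList_joinRun, hflat]
      · by_cases hk1 : k = 1
        · subst hk1
          rw [if_neg (by omega : ¬ (1:Nat) = 0), List.append_nil] at hflat
          rw [procRun_one_eq_flush cur ascB p z hne hk, loopA_nil]
          rw [if_pos rfl]
          exact congrArg (fun s => (s, (flushA cur p z).1, (flushA cur p z).2))
            (join_eq_of_flatAsc_eq hflat).symm
        · rw [if_neg hk0, List.append_nil] at hflat
          rw [procRun_other hk0 hk1, loopA_nil]
          rw [if_neg hk1, flushA_nil]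
          exact congrArg (fun s => (s, p, z)) (join_eq_of_flatAsc_eq hflat).symm
  | cons byte rest ih =>
      intro k cur ascB ascA p z hne hk hflat
      by_cases hkb : kindB byte = k
      · rw [runsGo, if_pos (by simpa using hkb)]
        have hk' : ∀ b ∈ cur ++ [byte], kindB b = k := by
          intro b hb; rcases List.mem_append.mp hb with hb | hb
          · exact hk b hb
          · simp at hb; subst hb; exact hkb
        by_cases hk0 : k = 0
        · subst hk0
          have ha : is_ascii byte = true := kind_zero_iff.mp hkb
          rw [if_neg (by omega : ¬ (0:Nat) = 1), loopA_cons_ascii ha, flushA_nil]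
          have := ih 0 (cur ++ [byte]) ascB (ascA ++ [chrStr byte]) p z (by simp) hk'
            (by rw [flatAsc_append_singleton, hflat]
                simp [chrStr, String.toList_singleton])
          simpa using this
        · by_cases hk1 : k = 1
          · subst hk1
            obtain ⟨ha, hpz⟩ := kind_one_elim' hkb
            rw [if_pos rfl, loopA_cons_buf ha hpz]
            have := ih 1 (cur ++ [byte]) ascB ascA p z (by simp) hk'
              (by simpa [if_neg (by omega : (1:Nat) ≠ 0)] using hflat)
            simpa using this
          · have hk2 : k = 2 := by
              have h2 := hk _ (List.head_mem hne)
              have h3 := kind_lt_three (cur.head hne)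
              omega
            subst hk2
            obtain ⟨ha, hp, hz⟩ := kind_two_elim hkb
            rw [if_neg (by omega : ¬ (2:Nat) = 1), loopA_cons_unknown ha hp hz, flushA_nil]
            have := ih 2 (cur ++ [byte]) ascB ascA p z (by simp) hk'
              (by simpa using hflat)
            simpa using this
      · rw [runsGo, if_neg (by simpa using hkb), List.foldl_cons]
        -- cross the run boundary: flush the pending run into the state, start run [byte]
        have hkbyte := kind_lt_three byte
        have hkcur : k < 3 := by
          have := hk _ (List.head_mem hne); have := kind_lt_three (cur.head hne); omega
        by_cases hk0 : k = 0
        all_goals by_cases hk1 : k = 1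
        · omega
        all_goals try subst hk0
        all_goals try subst hk1
        · -- k = 0, pending ascii run; byte has kind 1 or 2
          rw [if_pos rfl] at hflat
          rw [if_neg (by omega : ¬ (0:Nat) = 1), procRun_zero]
          have hBflat : flatAsc ascA = flatAsc (ascB ++ [PySem.Str.join "" (cur.map chrStr)]) := by
            rw [flatAsc_append_singleton, toList_joinRun, hflat]
          by_cases hb1 : kindB byte = 1
          · obtain ⟨ha, hpz⟩ := kind_one_elim' hb1
            rw [loopA_cons_buf ha hpz]
            have := ih 1 [byte] (ascB ++ [PySem.Str.join "" (cur.map chrStr)]) ascA p z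
              (by simp) (by simpa using hb1) (by simpa using hBflat)
            rw [hb1]
            simpa using this
          · have hb2 : kindB byte = 2 := by omega
            obtain ⟨ha, hp, hz⟩ := kind_two_elim hb2
            rw [loopA_cons_unknown ha hp hz, flushA_nil]
            have := ih 2 [byte] (ascB ++ [PySem.Str.join "" (cur.map chrStr)]) ascA p z
              (by simp) (by simpa using hb2) (by simpa using hBflat)
            rw [hb2]
            simpa using this
        · -- k = 1, pending buffer run; byte has kind 0 or 2 → A flushes
          rw [if_neg (by omega : ¬ (1:Nat) = 0), List.append_nil] at hflat
          rw [if_pos rfl, procRun_one_eq_flush cur ascB p z hne hk]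
          by_cases hb0 : kindB byte = 0
          · have ha : is_ascii byte = true := kind_zero_iff.mp hb0
            rw [loopA_cons_ascii ha]
            have := ih 0 [byte] ascB (ascA ++ [chrStr byte]) (flushA cur p z).1
              (flushA cur p z).2 (by simp) (by simpa using hb0)
              (by rw [flatAsc_append_singleton, hflat]
                  simp [chrStr, String.toList_singleton])
            rw [hb0]
            simpa using this
          · have hb2 : kindB byte = 2 := by omega
            obtain ⟨ha, hp, hz⟩ := kind_two_elim hb2
            rw [loopA_cons_unknown ha hp hz]
            have := ih 2 [byte] ascB ascA (flushA cur p z).1 (flushA cur p z).2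
              (by simp) (by simpa using hb2) (by simpa using hflat)
            rw [hb2]
            simpa using this
        · -- k = 2, pending unknown run: state unchanged
          have hk2 : k = 2 := by omega
          subst hk2
          rw [if_neg (by omega : ¬ (2:Nat) = 0), List.append_nil] at hflat
          rw [if_neg (by omega : ¬ (2:Nat) = 1), procRun_other (by omega) (by omega)]
          by_cases hb0 : kindB byte = 0
          · have ha : is_ascii byte = true := kind_zero_iff.mp hb0
            rw [loopA_cons_ascii ha, flushA_nil]
            have := ih 0 [byte] ascB (ascA ++ [chrStr byte]) p z (by simp)
              (by simpa using hb0)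
              (by rw [flatAsc_append_singleton, hflat]
                  simp [chrStr, String.toList_singleton])
            rw [hb0]
            simpa using this
          · have hb1 : kindB byte = 1 := by omega
            obtain ⟨ha, hpz⟩ := kind_one_elim' hb1
            rw [loopA_cons_buf ha hpz]
            have := ih 1 [byte] ascB ascA p z (by simp) (by simpa using hb1)
              (by simpa using hflat)
            rw [hb1]
            simpa using this

-- ===== VERDICT (by name: the statement is the Claim_ definition above) =====
theorem detect_and_decode_spec : Claim_equal_detect_and_decode := by
  intro bd _
  show detect_and_decode bd = detect_and_decode_alt bd
  cases bd with
  | nil => rfl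
  | cons byte rest =>
      unfold detect_and_decode detect_and_decode_alt runsOf
      have hstep : loopA (byte :: rest) [] [] [] [] =
          (let (a, pp, zz) := (runsGo (kindB byte) [byte] rest).foldl procRun ([], [], [])
           (PySem.Str.join "" a, pp, zz)) := by
        have hkb := kind_lt_three byte
        by_cases hb0 : kindB byte = 0
        · have ha : is_ascii byte = true := kind_zero_iff.mp hb0
          rw [loopA_cons_ascii ha, flushA_nil]
          have := main_inv rest 0 [byte] [] [chrStr byte] [] [] (by simp)
            (by simpa using hb0) (by simp [flatAsc, chrStr, String.toList_singleton])
          rw [← hb0] at this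
          simpa [hb0] using this.symm
        · by_cases hb1 : kindB byte = 1
          · obtain ⟨ha, hpz⟩ := kind_one_elim' hb1
            rw [loopA_cons_buf ha hpz]
            have := main_inv rest 1 [byte] [] [] [] [] (by simp)
              (by simpa using hb1) (by simp [flatAsc])
            rw [← hb1] at this
            simpa using this.symm
          · have hb2 : kindB byte = 2 := by omega
            obtain ⟨ha, hp, hz⟩ := kind_two_elim hb2
            rw [loopA_cons_unknown ha hp hz, flushA_nil]
            have := main_inv rest 2 [byte] [] [] [] [] (by simp)
              (by simpa using hb2) (by simp [flatAsc])
            rw [← hb2] at this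
            simpa [hb2] using this.symm
      rw [hstep]
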